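-- pv_equiv track=rewrite | github.com/tramnhatquang/LeetCode-Solutions-Python | 1968. Array With Elements Not Equal to Average of Neighbors.py | rearrangeArray_optimal
-- ===== SOURCE A (Python) =====
-- from typing import List
--
-- def rearrangeArray_optimal(nums: List[int]) -> List[int]:
--
--     # First, we sort the arr then put it in a pattern like this
--     # [nums[0], nums[n - 1], nums[1], nums[n-2], ... nums[k]]
--     # The trick here is to make sure the neighbors of a large middle number are smaller than itt. Similarly, the neighbors of a smaller middle number are larger than the middle
--     # The pattern like this: small big small big small
--     nums.sort()
--     res = []
--     n = len(nums)
--     for i in range(n // 2):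
--         res.append(nums[i])
--         res.append(nums[n-i-1])
--     if n % 2:  # if lenght of arr is odd
--         res.append(nums[n // 2])
--     return res
-- ===== SOURCE B (Python) =====
-- from typing import List
--
--
-- def rearrangeArray_optimal(nums: List[int]) -> List[int]:
--     nums.sort()  # same in-place sort as A
--     h = (len(nums) + 1) // 2
--     lo, hi = nums[:h], nums[h:][::-1]
--     res = [x for pair in zip(lo, hi) for x in pair]
--     return res + lo[len(hi):]
-- ===== Notes on version B (the rewrite author's own statement) =====
-- stated objective: alternative
-- what changed: Replaces the index-arithmetic loop (appending nums[i], nums[n-i-1] for i in range(n//2) plus a parity-guarded middle element) by splitting the sorted list into a low half and a reversed high half and recursively interleaving the two halves, with no index arithmetic and no parity branch.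
import Mathlib
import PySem

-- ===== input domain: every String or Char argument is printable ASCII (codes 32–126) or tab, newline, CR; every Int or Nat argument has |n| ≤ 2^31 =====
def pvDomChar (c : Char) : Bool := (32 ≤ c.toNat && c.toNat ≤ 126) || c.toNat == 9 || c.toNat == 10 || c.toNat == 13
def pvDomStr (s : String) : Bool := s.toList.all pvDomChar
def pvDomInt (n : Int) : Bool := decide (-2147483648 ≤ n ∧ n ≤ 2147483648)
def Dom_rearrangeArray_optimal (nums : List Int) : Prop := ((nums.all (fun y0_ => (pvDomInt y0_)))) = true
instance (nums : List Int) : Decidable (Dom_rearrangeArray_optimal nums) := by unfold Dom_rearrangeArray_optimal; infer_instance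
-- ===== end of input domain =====

-- B restructures A's index loop into split-then-interleave over two half-lists (same cost);
-- both Pythons sort the argument in place, the theorems are about the return value.

-- ===== PORT A =====
def rearrangeArray_optimal (nums : List Int) : List Int :=
  let s := PySem.List.sorted nums (fun x => x) false     -- nums.sort()
  let n : Int := s.length
  -- for i in range(n // 2): res.append(nums[i]); res.append(nums[n-i-1])
  -- (indices are always in range here, so pyGetD with default 0 is exact)
  let res := (PySem.List.pyRange 0 (PySem.Int.floordiv n 2) 1).foldl
    (fun res i => res ++ [PySem.List.pyGetD s i 0, PySem.List.pyGetD s (n - i - 1) 0]) []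
  if PySem.Int.mod n 2 ≠ 0 then res ++ [PySem.List.pyGetD s (PySem.Int.floordiv n 2) 0] else res

-- ===== PORT B =====
def rearrangeArray_optimal_alt (nums : List Int) : List Int :=
  let s := PySem.List.sorted nums (fun x => x) false     -- nums.sort()
  let h : Int := PySem.Int.floordiv ((s.length : Int) + 1) 2
  -- nums[:h] and nums[h:][::-1]; step -1 never fails on a list, so getD [] is exact
  let lo := PySem.List.slice s none (some h)
  let hi := (PySem.List.slice? (PySem.List.slice s (some h) none) none none (-1)).getD []
  -- [x for pair in zip(lo, hi) for x in pair]
  let res := (lo.zip hi).flatMap (fun p => [p.1, p.2])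
  res ++ PySem.List.slice lo (some ((hi.length : Int))) none

-- ===== PRECONDITION & SPEC =====
def Spec_rearrangeArray_optimal (nums : List Int) (out : List Int) : Prop := out = rearrangeArray_optimal_alt nums
instance (nums : List Int) (out : List Int) : Decidable (Spec_rearrangeArray_optimal nums out) := by unfold Spec_rearrangeArray_optimal; infer_instance

-- ===== CLAIM (what is proved, stated in full; the proofs are below) =====
def Claim_equal_rearrangeArray_optimal : Prop := ∀ (nums : List Int), Dom_rearrangeArray_optimal nums → Spec_rearrangeArray_optimal nums (rearrangeArray_optimal nums)

-- ===== LEMMAS AND PROOFS =====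

-- the zip-and-flatten of two lists, the second no longer than the first,
-- is the per-index pair expansion over the second list's length.
theorem zip_flatMap_eq (hi : List Int) : ∀ (lo : List Int), hi.length ≤ lo.length →
    (lo.zip hi).flatMap (fun p => [p.1, p.2]) =
      (List.range hi.length).flatMap (fun j => [lo.getD j 0, hi.getD j 0]) := by
  induction hi with
  | nil => intro lo _; simp
  | cons b hb ih =>
      intro lo hlen
      cases lo with
      | nil => simp at hlen
      | cons a la =>
          simp only [List.length_cons, Nat.add_le_add_iff_right] at hlen
          rw [List.zip_cons_cons, List.flatMap_cons, ih la hlen]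
          simp [List.range_succ_eq_map, List.flatMap_map]

-- the common core: for ANY list s (here s = sorted nums) the two function bodies agree
theorem core_eq (s : List Int) :
    (let n : Int := s.length
     let res := (PySem.List.pyRange 0 (PySem.Int.floordiv n 2) 1).foldl
       (fun res i => res ++ [PySem.List.pyGetD s i 0, PySem.List.pyGetD s (n - i - 1) 0]) []
     if PySem.Int.mod n 2 ≠ 0 then res ++ [PySem.List.pyGetD s (PySem.Int.floordiv n 2) 0] else res)
    =
    (let h : Int := PySem.Int.floordiv ((s.length : Int) + 1) 2
     let lo := PySem.List.slice s none (some h)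
     let hi := (PySem.List.slice? (PySem.List.slice s (some h) none) none none (-1)).getD []
     let res := (lo.zip hi).flatMap (fun p => [p.1, p.2])
     res ++ PySem.List.slice lo (some ((hi.length : Int))) none) := by
  set m := s.length with hm
  have hfd1 : PySem.Int.floordiv ((m:Int)+1) 2 = (((m+1)/2 : Nat) : Int) := by
    have := PySem.Int.floordiv_natCast (m+1) 2
    push_cast at this ⊢
    exact_mod_cast this
  have hfd2 : PySem.Int.floordiv ((m:Int)) 2 = ((m/2 : Nat) : Int) := by
    exact_mod_cast PySem.Int.floordiv_natCast m 2
  have hmod : PySem.Int.mod ((m:Int)) 2 = ((m % 2 : Nat) : Int) := by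
    exact_mod_cast PySem.Int.mod_natCast m 2
  simp only [hfd1, hfd2, hmod,
    PySem.List.slice_to_natCast, PySem.List.slice_from_natCast,
    PySem.List.slice?_none_none_neg_one, Option.getD_some,
    PySem.List.foldl_append_eq_flatMap, List.nil_append]
  rw [zip_flatMap_eq _ _ (by simp; omega)]
  have hlen : (List.drop ((m+1)/2) s).reverse.length = m/2 := by simp; omega
  rw [hlen, PySem.List.pyRange_zero_nat, List.flatMap_map]
  have hcong : ∀ j ∈ List.range (m/2),
      (fun j : Nat => [PySem.List.pyGetD s (↑j) 0, PySem.List.pyGetD s (↑m - ↑j - 1) 0]) j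
      = (fun j : Nat => [(List.take ((m + 1) / 2) s).getD j 0,
          (List.drop ((m + 1) / 2) s).reverse.getD j 0]) j := by
    intro j hj
    rw [List.mem_range] at hj
    simp only [PySem.List.pyGetD_natCast]
    have h1 : (List.take ((m + 1) / 2) s).getD j 0 = s.getD j 0 := by
      simp only [List.getD_eq_getElem?_getD, List.getElem?_take_of_lt (by omega : j < (m+1)/2)]
    have hidx : (↑m - ↑j - 1 : Int) = ((m - 1 - j : Nat) : Int) := by omega
    have h2 : (List.drop ((m + 1) / 2) s).reverse.getD j 0 = s.getD (m - 1 - j) 0 := by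
      have hj2 : j < (List.drop ((m + 1) / 2) s).length := by simp; omega
      simp only [List.getD_eq_getElem?_getD, List.getElem?_reverse hj2,
        List.getElem?_drop, List.length_drop]
      congr 2
      omega
    rw [h1, hidx, PySem.List.pyGetD_natCast, h2]
  rw [List.flatMap_def, List.flatMap_def, List.map_congr_left hcong, ← List.flatMap_def]
  by_cases hpar : m % 2 = 1
  · rw [if_pos (by simp [hpar])]
    have h1 : (m+1)/2 - m/2 = 1 := by omega
    rw [List.drop_take, h1, List.take_one, List.head?_drop]
    congr 1
    rw [PySem.List.pyGetD_natCast, List.getD_eq_getElem?_getD,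
      List.getElem?_eq_getElem (by omega : m/2 < m)]
    simp
  · have h0 : m % 2 = 0 := by omega
    rw [if_neg (by simp [h0])]
    have h1 : (m+1)/2 - m/2 = 0 := by omega
    rw [List.drop_take, h1, List.take_zero, List.append_nil]

theorem rearrangeArray_optimal_eq_alt (nums : List Int) :
    rearrangeArray_optimal nums = rearrangeArray_optimal_alt nums := by
  unfold rearrangeArray_optimal rearrangeArray_optimal_alt
  exact core_eq (PySem.List.sorted nums (fun x => x) false)

-- ===== VERDICT (by name: the statement is the Claim_ definition above) =====
theorem rearrangeArray_optimal_spec : Claim_equal_rearrangeArray_optimal := by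
  intro nums _
  unfold Spec_rearrangeArray_optimal
  exact rearrangeArray_optimal_eq_alt nums
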